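-- pv_equiv track=rewrite | github.com/ekkuleivonen/racksmith | backend/ssh/misc.py | _extract_hostnamectl_os
-- ===== SOURCE A (Python) =====
-- def _extract_hostnamectl_os(raw: str) -> str:
--     for line in raw.splitlines():
--         if ":" not in line:
--             continue
--         key, value = line.split(":", 1)
--         if key.strip().lower() == "operating system":
--             return value.strip()
--     return ""
-- ===== SOURCE B (Python) =====
-- def _extract_hostnamectl_os(raw: str) -> str:
--     table = {}
--     for line in raw.splitlines():
--         if ":" in line:
--             key, value = line.split(":", 1)
--             table.setdefault(key.strip().lower(), value.strip())
--     return table.get("operating system", "")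
-- ===== Notes on version B (the rewrite author's own statement) =====
-- stated objective: idiomatic
-- what changed: Replaces A's scan-until-match-and-early-return with building a first-wins key->value table of all lines once and a single lookup afterwards.
import Mathlib
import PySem

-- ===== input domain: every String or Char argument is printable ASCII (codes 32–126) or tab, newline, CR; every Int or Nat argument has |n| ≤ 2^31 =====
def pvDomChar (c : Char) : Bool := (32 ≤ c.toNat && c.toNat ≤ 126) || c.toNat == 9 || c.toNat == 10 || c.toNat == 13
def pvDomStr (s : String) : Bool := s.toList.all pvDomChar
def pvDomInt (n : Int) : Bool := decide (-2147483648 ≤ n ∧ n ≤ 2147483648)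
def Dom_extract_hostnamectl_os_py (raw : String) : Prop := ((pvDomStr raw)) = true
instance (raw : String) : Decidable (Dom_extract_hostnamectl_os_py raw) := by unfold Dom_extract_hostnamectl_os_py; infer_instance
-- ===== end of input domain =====

-- B replaces A's scan-until-match-and-early-return by building a first-wins table of
-- all "key: value" lines once and looking up "operating system" afterwards (idiomatic).

-- ===== PORT A =====
-- shared helper: 'key, value = line.split(":", 1)' (both Pythons perform this unpack;
-- the fallback arm is unreachable because it is only called when ":" is in line)
def pvSplitKV (line : String) : String × String :=
  match (PySem.Str.splitMax? line ":" 1).getD [] with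
  | [k, v] => (k, v)
  | _ => ("", "")

-- the for-loop of A: scan lines, return the first match's stripped value, else ""
def pvAScan : List String → String
  | [] => ""
  | line :: rest =>
    if PySem.Str.isIn ":" line then
      if PySem.Str.lower (PySem.Str.strip (pvSplitKV line).1) = "operating system" then
        PySem.Str.strip (pvSplitKV line).2
      else pvAScan rest
    else pvAScan rest

def extract_hostnamectl_os_py (raw : String) : String :=
  pvAScan (PySem.Str.splitlines raw)

-- ===== PORT B =====
-- one loop iteration of B: record the line in the table, first occurrence wins
def pvBStep (d : PySem.Dict String String) (line : String) : PySem.Dict String String :=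
  if PySem.Str.isIn ":" line then
    d.setdefault (PySem.Str.lower (PySem.Str.strip (pvSplitKV line).1))
                 (PySem.Str.strip (pvSplitKV line).2)
  else d

def extract_hostnamectl_os_py_alt (raw : String) : String :=
  let table := (PySem.Str.splitlines raw).foldl pvBStep PySem.Dict.empty
  table.getD "operating system" ""

-- ===== PRECONDITION & SPEC =====
def Spec_extract_hostnamectl_os_py (raw : String) (out : String) : Prop := out = extract_hostnamectl_os_py_alt raw
instance (raw : String) (out : String) : Decidable (Spec_extract_hostnamectl_os_py raw out) := by unfold Spec_extract_hostnamectl_os_py; infer_instance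

-- ===== CLAIM (what is proved, stated in full; the proofs are below) =====
def Claim_equal_extract_hostnamectl_os_py : Prop := ∀ (raw : String), Dom_extract_hostnamectl_os_py raw → Spec_extract_hostnamectl_os_py raw (extract_hostnamectl_os_py raw)

-- ===== LEMMAS AND PROOFS =====
-- Invariant of B's fold: the final lookup equals the table's current binding if any,
-- and otherwise A's scan of the remaining lines.
theorem pvFold_getD (lines : List String) :
    ∀ d : PySem.Dict String String,
      (lines.foldl pvBStep d).getD "operating system" "" =
        (d.get? "operating system").getD (pvAScan lines) := by
  induction lines with
  | nil =>
    intro d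
    simp [PySem.Dict.getD_eq_get?_getD, pvAScan]
  | cons line rest ih =>
    intro d
    simp only [List.foldl_cons]
    rw [ih]
    unfold pvBStep
    simp only [pvAScan]
    by_cases hc : PySem.Str.isIn ":" line = true
    · rw [if_pos hc, if_pos hc]
      by_cases hk : PySem.Str.lower (PySem.Str.strip (pvSplitKV line).1) = "operating system"
      · rw [if_pos hk, hk]
        rcases hget : (PySem.Dict.get? d "operating system") with _ | v
        · have hcon : d.contains "operating system" = false := by
            rw [PySem.Dict.contains_eq_isSome_get?, hget]; rfl
          rw [PySem.Dict.setdefault_of_not_contains d _ hcon,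
              PySem.Dict.get?_insert_self]
          simp only [Option.getD_some, Option.getD_none]
        · have hcon : d.contains "operating system" = true := by
            rw [PySem.Dict.contains_eq_isSome_get?, hget]; rfl
          rw [PySem.Dict.setdefault_of_contains d _ hcon, hget]
          simp only [Option.getD_some]
      · rw [if_neg hk,
            PySem.Dict.get?_setdefault_of_ne d (PySem.Str.strip (pvSplitKV line).2)
              (fun h => hk h.symm)]
    · rw [if_neg hc, if_neg hc]

-- ===== VERDICT (by name: the statement is the Claim_ definition above) =====
theorem extract_hostnamectl_os_py_spec : Claim_equal_extract_hostnamectl_os_py := by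
  intro raw _
  unfold Spec_extract_hostnamectl_os_py extract_hostnamectl_os_py extract_hostnamectl_os_py_alt
  rw [pvFold_getD]
  simp [PySem.Dict.get?_empty]
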